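-- pv_equiv track=rewrite | github.com/rootiq-ai/agentic-ai-prometheus | src/core/utils.py | parse_prometheus_labels
-- ===== SOURCE A (Python) =====
-- from typing import Dict, List, Any, Optional, Union
--
-- def parse_prometheus_labels(labels_str: str) -> Dict[str, str]:
--     """Parse Prometheus labels string into dictionary.
--
--     Args:
--         labels_str: Labels string like '{job="prometheus",instance="localhost:9090"}'
--
--     Returns:
--         Dictionary of label key-value pairs
--     """
--     if not labels_str or labels_str == '{}':
--         return {}
--
--     # Remove outer braces
--     labels_str = labels_str.strip('{}')
--
--     labels = {}
--
--     # Split by comma, but handle quoted values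
--     parts = []
--     current_part = ""
--     in_quotes = False
--
--     for char in labels_str:
--         if char == '"':
--             in_quotes = not in_quotes
--         elif char == ',' and not in_quotes:
--             parts.append(current_part.strip())
--             current_part = ""
--             continue
--
--         current_part += char
--
--     if current_part.strip():
--         parts.append(current_part.strip())
--
--     # Parse each key=value pair
--     for part in parts:
--         if '=' in part:
--             key, value = part.split('=', 1)
--             key = key.strip()
--             value = value.strip().strip('"')
--             labels[key] = value
--
--     return labels
-- ===== SOURCE B (Python) =====
-- def parse_prometheus_labels(labels_str: str) -> dict:
--     """Single left-to-right scan building the dict directly (no intermediate parts list)."""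
--     if not labels_str or labels_str == '{}':
--         return {}
--     s = labels_str.strip('{}')
--     labels = {}
--     key_buf = ""
--     val_buf = ""
--     in_quotes = False
--     seen_eq = False
--     for ch in s:
--         if ch == '"':
--             in_quotes = not in_quotes
--             if seen_eq:
--                 val_buf += ch
--             else:
--                 key_buf += ch
--         elif ch == ',' and not in_quotes:
--             if seen_eq:
--                 labels[key_buf.strip()] = val_buf.strip().strip('"')
--             key_buf = ""
--             val_buf = ""
--             seen_eq = False
--         elif ch == '=' and not seen_eq:
--             seen_eq = True
--         elif seen_eq:
--             val_buf += ch
--         else: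
--             key_buf += ch
--     if seen_eq:
--         labels[key_buf.strip()] = val_buf.strip().strip('"')
--     return labels
-- ===== Notes on version B (the rewrite author's own statement) =====
-- stated objective: simpler
-- what changed: Replaces A's two-phase parse (first loop splits the string into a parts list on unquoted commas, second loop splits each part at '=') with a single left-to-right scan that maintains key/value buffers plus in_quotes and seen_eq flags and inserts each pair into the dict directly, eliminating the intermediate parts list and the per-part split pass.
import Mathlib
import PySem

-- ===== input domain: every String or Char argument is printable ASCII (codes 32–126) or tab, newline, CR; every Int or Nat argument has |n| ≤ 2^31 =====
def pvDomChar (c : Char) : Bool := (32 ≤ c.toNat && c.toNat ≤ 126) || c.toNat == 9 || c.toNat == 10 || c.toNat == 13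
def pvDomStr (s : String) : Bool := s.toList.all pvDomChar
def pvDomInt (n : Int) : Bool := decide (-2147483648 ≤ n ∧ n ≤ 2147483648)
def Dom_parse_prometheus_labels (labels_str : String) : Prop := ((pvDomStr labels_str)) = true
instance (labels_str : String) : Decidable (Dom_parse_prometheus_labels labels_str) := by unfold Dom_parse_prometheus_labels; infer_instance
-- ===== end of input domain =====

-- B replaces A's two-phase split-into-parts-then-split-each-part parsing by a single
-- left-to-right scan that builds the dict directly (objective: simpler, one pass, no parts list).

-- ===== PORT A =====
-- state: (parts, current_part, in_quotes)
def pvAStep (st : List (List Char) × List Char × Bool) (ch : Char) :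
    List (List Char) × List Char × Bool :=
  if ch = '"' then (st.1, st.2.1 ++ [ch], !st.2.2)
  else if ch = ',' ∧ st.2.2 = false then (st.1 ++ [PySem.Chars.strip st.2.1], [], st.2.2)
  else (st.1, st.2.1 ++ [ch], st.2.2)

-- "if '=' in part: key, value = part.split('=', 1); labels[key.strip()] = value.strip().strip('"')"
-- part.split('=', 1) is ported by hand as takeWhile/dropWhile at the first '=' (exact when '=' ∈ part).
def pvADictStep (d : PySem.Dict String String) (part : List Char) : PySem.Dict String String :=
  if '=' ∈ part then
    d.insert (String.ofList (PySem.Chars.strip (part.takeWhile (· ≠ '='))))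
      (String.ofList (PySem.Chars.stripChars (PySem.Chars.strip ((part.dropWhile (· ≠ '=')).tail)) ['"']))
  else d

def parse_prometheus_labels (labels_str : String) : List (String × String) :=
  if labels_str = "" ∨ labels_str = "{}" then []
  else
    let cs := PySem.Chars.stripChars labels_str.toList ['{', '}']
    let st := cs.foldl pvAStep ([], [], false)
    let parts := if PySem.Chars.strip st.2.1 ≠ [] then st.1 ++ [PySem.Chars.strip st.2.1] else st.1
    (parts.foldl pvADictStep PySem.Dict.empty).items

-- ===== PORT B =====
def pvBEmit (d : PySem.Dict String String) (kb vb : List Char) : PySem.Dict String String :=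
  d.insert (String.ofList (PySem.Chars.strip kb))
    (String.ofList (PySem.Chars.stripChars (PySem.Chars.strip vb) ['"']))

-- state: (labels, key_buf, val_buf, in_quotes, seen_eq)
def pvBStep (st : PySem.Dict String String × List Char × List Char × Bool × Bool) (ch : Char) :
    PySem.Dict String String × List Char × List Char × Bool × Bool :=
  match st with
  | (d, kb, vb, inq, seq) =>
    if ch = '"' then
      if seq then (d, kb, vb ++ [ch], !inq, seq) else (d, kb ++ [ch], vb, !inq, seq)
    else if ch = ',' ∧ inq = false then
      ((if seq then pvBEmit d kb vb else d), [], [], inq, false)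
    else if ch = '=' ∧ seq = false then (d, kb, vb, inq, true)
    else if seq then (d, kb, vb ++ [ch], inq, seq) else (d, kb ++ [ch], vb, inq, seq)

def parse_prometheus_labels_alt (labels_str : String) : List (String × String) :=
  if labels_str = "" ∨ labels_str = "{}" then []
  else
    let cs := PySem.Chars.stripChars labels_str.toList ['{', '}']
    let st := cs.foldl pvBStep (PySem.Dict.empty, [], [], false, false)
    (if st.2.2.2.2 then pvBEmit st.1 st.2.1 st.2.2.1 else st.1).items

-- ===== PRECONDITION & SPEC =====
def Spec_parse_prometheus_labels (labels_str : String) (out : List (String × String)) : Prop := out = parse_prometheus_labels_alt labels_str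
instance (labels_str : String) (out : List (String × String)) : Decidable (Spec_parse_prometheus_labels labels_str out) := by unfold Spec_parse_prometheus_labels; infer_instance

-- ===== CLAIM (what is proved, stated in full; the proofs are below) =====
def Claim_equal_parse_prometheus_labels : Prop := ∀ (labels_str : String), Dom_parse_prometheus_labels labels_str → Spec_parse_prometheus_labels labels_str (parse_prometheus_labels labels_str)

-- ===== LEMMAS AND PROOFS =====

-- membership survives dropWhile when the predicate fails on the element
theorem pv_mem_dropWhile {α : Type} (p : α → Bool) {c : α} {l : List α}
    (h : c ∈ l) (hp : p c = false) : c ∈ l.dropWhile p := by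
  induction l with
  | nil => cases h
  | cons a t ih =>
      by_cases ha : p a = true
      · rw [List.dropWhile_cons_of_pos ha]
        rcases List.mem_cons.mp h with h | h
        · subst h; simp [hp] at ha
        · exact ih h
      · rw [List.dropWhile_cons_of_neg ha]; exact h

theorem pv_mem_strip {c : Char} {l : List Char}
    (h : c ∈ l) (hc : PySem.Chars.isspace c = false) : c ∈ PySem.Chars.strip l := by
  unfold PySem.Chars.strip PySem.Chars.lstrip PySem.Chars.rstrip
  have h1 : c ∈ l.dropWhile PySem.Chars.isspace := pv_mem_dropWhile _ h hc
  have h2 : c ∈ (l.dropWhile PySem.Chars.isspace).reverse := List.mem_reverse.mpr h1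
  exact List.mem_reverse.mpr (pv_mem_dropWhile _ h2 hc)

theorem pv_strip_subset {c : Char} {l : List Char}
    (h : c ∈ PySem.Chars.strip l) : c ∈ l := by
  unfold PySem.Chars.strip PySem.Chars.lstrip PySem.Chars.rstrip at h
  have h1 := List.mem_reverse.mp h
  have h2 := (List.dropWhile_sublist _).subset h1
  exact (List.dropWhile_sublist _).subset (List.mem_reverse.mp h2)

theorem pv_takeWhile_eq {l r : List Char} (h : '=' ∉ l) :
    (l ++ '=' :: r).takeWhile (· ≠ '=') = l := by
  induction l with
  | nil => simp
  | cons a t ih =>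
      have ha : a ≠ '=' := fun hh => h (hh ▸ List.mem_cons_self)
      rw [List.cons_append, List.takeWhile_cons, if_pos (by simpa using ha),
        ih (fun hm => h (List.mem_cons_of_mem _ hm))]

theorem pv_dropWhile_eq {l r : List Char} (h : '=' ∉ l) :
    (l ++ '=' :: r).dropWhile (· ≠ '=') = '=' :: r := by
  induction l with
  | nil => simp
  | cons a t ih =>
      have ha : a ≠ '=' := fun hh => h (hh ▸ List.mem_cons_self)
      rw [List.cons_append, List.dropWhile_cons, if_pos (by simpa using ha),
        ih (fun hm => h (List.mem_cons_of_mem _ hm))]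

theorem pv_lstrip_append (l r : List Char) :
    PySem.Chars.lstrip (l ++ '=' :: r) = PySem.Chars.lstrip l ++ '=' :: r := by
  unfold PySem.Chars.lstrip
  rw [List.dropWhile_append]
  split <;> rename_i hh
  · simp only [List.isEmpty_iff] at hh
    rw [hh, List.dropWhile_cons_of_neg (show ¬PySem.Chars.isspace '=' = true by decide)]
    simp
  · rfl

theorem pv_rstrip_eq (l : List Char) :
    PySem.Chars.rstrip l = List.rdropWhile PySem.Chars.isspace l := rfl

theorem pv_rstrip_append (l r : List Char) :
    PySem.Chars.rstrip (l ++ '=' :: r) = l ++ '=' :: PySem.Chars.rstrip r := by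
  unfold PySem.Chars.rstrip
  have hrev : (l ++ '=' :: r).reverse = r.reverse ++ '=' :: l.reverse := by simp
  rw [hrev, List.dropWhile_append]
  by_cases hE : List.dropWhile PySem.Chars.isspace r.reverse = []
  · rw [if_pos (by simp [hE]),
      List.dropWhile_cons_of_neg (show ¬PySem.Chars.isspace '=' = true by decide), hE]
    simp
  · rw [if_neg (by simp [List.isEmpty_iff, hE])]
    simp

theorem pv_lstrip_rstrip_comm (l : List Char) :
    PySem.Chars.lstrip (PySem.Chars.rstrip l) = PySem.Chars.rstrip (PySem.Chars.lstrip l) := by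
  induction l using List.reverseRecOn with
  | nil => rfl
  | append_singleton t x ih =>
      have hls0 : List.dropWhile PySem.Chars.isspace t = [] →
          PySem.Chars.lstrip (t ++ [x]) = List.dropWhile PySem.Chars.isspace [x] := by
        intro hE
        unfold PySem.Chars.lstrip
        rw [List.dropWhile_append, if_pos (by simp [hE])]
      have hls1 : List.dropWhile PySem.Chars.isspace t ≠ [] →
          PySem.Chars.lstrip (t ++ [x]) = PySem.Chars.lstrip t ++ [x] := by
        intro hE
        unfold PySem.Chars.lstrip
        rw [List.dropWhile_append, if_neg (by simp [List.isEmpty_iff, hE])]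
      by_cases hx : PySem.Chars.isspace x = true
      · have h1 : PySem.Chars.rstrip (t ++ [x]) = PySem.Chars.rstrip t := by
          rw [pv_rstrip_eq, pv_rstrip_eq]; exact List.rdropWhile_concat_pos _ _ _ hx
        rw [h1, ih]
        by_cases hE : List.dropWhile PySem.Chars.isspace t = []
        · have hlt : PySem.Chars.lstrip t = [] := hE
          rw [hlt, hls0 hE, List.dropWhile_cons_of_pos hx, List.dropWhile_nil]
        · have h2 : PySem.Chars.rstrip (PySem.Chars.lstrip t ++ [x])
              = PySem.Chars.rstrip (PySem.Chars.lstrip t) := by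
            rw [pv_rstrip_eq, pv_rstrip_eq]; exact List.rdropWhile_concat_pos _ _ _ hx
          rw [hls1 hE, h2]
      · have h1 : PySem.Chars.rstrip (t ++ [x]) = t ++ [x] := by
          rw [pv_rstrip_eq]; exact List.rdropWhile_concat_neg _ _ _ hx
        rw [h1]
        by_cases hE : List.dropWhile PySem.Chars.isspace t = []
        · rw [hls0 hE, List.dropWhile_cons_of_neg hx]
          have h2 : PySem.Chars.rstrip [x] = [x] := by
            rw [pv_rstrip_eq, show ([x] : List Char) = [] ++ [x] by simp]
            exact List.rdropWhile_concat_neg _ _ _ hx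
          rw [h2]
        · have h2 : PySem.Chars.rstrip (PySem.Chars.lstrip t ++ [x])
              = PySem.Chars.lstrip t ++ [x] := by
            rw [pv_rstrip_eq]; exact List.rdropWhile_concat_neg _ _ _ hx
          rw [hls1 hE, h2]

theorem pv_dropWhile_idem {α : Type} (p : α → Bool) (l : List α) :
    (l.dropWhile p).dropWhile p = l.dropWhile p := by
  induction l with
  | nil => rfl
  | cons a t ih =>
      by_cases ha : p a = true
      · rw [List.dropWhile_cons_of_pos ha]; exact ih
      · rw [List.dropWhile_cons_of_neg ha, List.dropWhile_cons_of_neg ha]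

theorem pv_strip_lstrip (l : List Char) :
    PySem.Chars.strip (PySem.Chars.lstrip l) = PySem.Chars.strip l := by
  unfold PySem.Chars.strip
  congr 1
  unfold PySem.Chars.lstrip
  exact pv_dropWhile_idem _ l

theorem pv_strip_rstrip (l : List Char) :
    PySem.Chars.strip (PySem.Chars.rstrip l) = PySem.Chars.strip l := by
  unfold PySem.Chars.strip
  rw [pv_lstrip_rstrip_comm, pv_rstrip_eq, pv_rstrip_eq, List.rdropWhile_idempotent]

theorem pv_strip_split {kb vb : List Char} :
    PySem.Chars.strip (kb ++ '=' :: vb)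
      = PySem.Chars.lstrip kb ++ '=' :: PySem.Chars.rstrip vb := by
  unfold PySem.Chars.strip
  rw [pv_lstrip_append, pv_rstrip_append]

theorem pv_not_mem_lstrip {kb : List Char} (h : '=' ∉ kb) : '=' ∉ PySem.Chars.lstrip kb :=
  fun hm => h ((List.dropWhile_sublist _).subset hm)

-- the key identity: flushing A's stripped part equals B's buffer emit
theorem pv_emit_eq (d : PySem.Dict String String) {kb vb : List Char} (h : '=' ∉ kb) :
    pvADictStep d (PySem.Chars.strip (kb ++ '=' :: vb)) = pvBEmit d kb vb := by
  have hmem : '=' ∈ PySem.Chars.strip (kb ++ '=' :: vb) :=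
    pv_mem_strip (by simp) (by decide)
  unfold pvADictStep pvBEmit
  rw [if_pos hmem, pv_strip_split,
    pv_takeWhile_eq (pv_not_mem_lstrip h), pv_dropWhile_eq (pv_not_mem_lstrip h)]
  simp only [List.tail_cons]
  rw [pv_strip_lstrip, pv_strip_rstrip]

theorem pv_no_emit (d : PySem.Dict String String) {kb : List Char} (h : '=' ∉ kb) :
    pvADictStep d (PySem.Chars.strip kb) = d := by
  unfold pvADictStep
  rw [if_neg (fun hm => h (pv_strip_subset hm))]

-- the coupling invariant between A's state and B's state
def pvRel (a : List (List Char) × List Char × Bool)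
    (b : PySem.Dict String String × List Char × List Char × Bool × Bool) : Prop :=
  b.2.2.2.1 = a.2.2 ∧
  b.1 = a.1.foldl pvADictStep PySem.Dict.empty ∧
  '=' ∉ b.2.1 ∧
  (if b.2.2.2.2 then a.2.1 = b.2.1 ++ '=' :: b.2.2.1 else a.2.1 = b.2.1 ∧ b.2.2.1 = [])

theorem pvRel_step {a b} (h : pvRel a b) (ch : Char) : pvRel (pvAStep a ch) (pvBStep b ch) := by
  obtain ⟨parts, cur, inq⟩ := a
  obtain ⟨d, kb, vb, binq, seq⟩ := b
  obtain ⟨h1, h2, h3, h4⟩ := h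
  simp only at h1 h2 h3 h4
  subst h1 h2
  simp only [pvAStep, pvBStep, pvRel]
  by_cases hq : ch = '"'
  · subst hq
    cases seq <;> simp only [if_true, if_false, Bool.false_eq_true] at h4 ⊢ <;> simp_all
  · rw [if_neg hq, if_neg hq]
    by_cases hc : ch = ',' ∧ binq = false
    · rw [if_pos hc, if_pos hc]
      cases seq
      · simp only [Bool.false_eq_true, if_false] at h4 ⊢
        obtain ⟨hcur, hvb⟩ := h4
        subst hcur
        simp [pv_no_emit _ h3]
      · simp only [if_true] at h4 ⊢
        subst h4
        simp [pv_emit_eq _ h3]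
    · rw [if_neg hc, if_neg hc]
      by_cases he : ch = '=' ∧ seq = false
      · obtain ⟨he1, he2⟩ := he
        subst he1 he2
        simp only [Bool.false_eq_true, if_false] at h4
        obtain ⟨hcur, hvb⟩ := h4
        subst hcur hvb
        simp [h3]
      · rw [if_neg he]
        cases seq
        · simp only [Bool.false_eq_true, if_false] at h4 ⊢
          obtain ⟨hcur, hvb⟩ := h4
          subst hcur hvb
          have hne : ch ≠ '=' := fun hh => he ⟨hh, rfl⟩
          simp [h3, Ne.symm hne]
        · simp only [if_true] at h4 ⊢
          subst h4
          simp [h3]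

theorem pvRel_foldl (cs : List Char) {a b} (h : pvRel a b) :
    pvRel (cs.foldl pvAStep a) (cs.foldl pvBStep b) := by
  induction cs generalizing a b with
  | nil => exact h
  | cons c t ih => exact ih (pvRel_step h c)

theorem pvRel_finish {a b} (h : pvRel a b) :
    ((if PySem.Chars.strip a.2.1 ≠ [] then a.1 ++ [PySem.Chars.strip a.2.1] else a.1).foldl
        pvADictStep PySem.Dict.empty)
      = (if b.2.2.2.2 then pvBEmit b.1 b.2.1 b.2.2.1 else b.1) := by
  obtain ⟨parts, cur, inq⟩ := a
  obtain ⟨d, kb, vb, inq', seq⟩ := b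
  obtain ⟨h1, h2, h3, h4⟩ := h
  simp only at h1 h2 h3 h4 ⊢
  subst h2
  cases seq
  · simp only [Bool.false_eq_true, if_false] at h4 ⊢
    obtain ⟨hcur, hvb⟩ := h4
    subst hcur
    split
    · rw [List.foldl_concat, pv_no_emit _ h3]
    · rfl
  · simp only [if_true] at h4 ⊢
    subst h4
    have hmem : '=' ∈ PySem.Chars.strip (kb ++ '=' :: vb) := pv_mem_strip (by simp) (by decide)
    rw [if_pos (fun hh => by rw [hh] at hmem; cases hmem), List.foldl_concat, pv_emit_eq _ h3]

-- ===== VERDICT (by name: the statement is the Claim_ definition above) =====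
theorem parse_prometheus_labels_spec : Claim_equal_parse_prometheus_labels := by
  intro labels_str _
  simp only [Spec_parse_prometheus_labels, parse_prometheus_labels, parse_prometheus_labels_alt]
  by_cases hg : labels_str = "" ∨ labels_str = "{}"
  · rw [if_pos hg, if_pos hg]
  · rw [if_neg hg, if_neg hg]
    have hrel : pvRel
        ((PySem.Chars.stripChars labels_str.toList ['{', '}']).foldl pvAStep ([], [], false))
        ((PySem.Chars.stripChars labels_str.toList ['{', '}']).foldl pvBStep
          (PySem.Dict.empty, [], [], false, false)) :=
      pvRel_foldl _ ⟨rfl, rfl, by simp, by simp⟩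
    rw [pvRel_finish hrel]
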